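-- pv_equiv track=rewrite | github.com/dalethestirling/aoc_2022 | day8.py | check_horizontal
-- ===== SOURCE A (Python) =====
-- forest = []
--
-- def check_horizontal(row, column, forest=forest):
--     # Consider tree visible by default
--     left = True
--     right = True
--
--     tree = forest[row][column]
--     neighbours_left = list(reversed(range(0, column)))
--     neighbours_right = list(range(column+1, len(forest[row])))
--     for neighbour in neighbours_left:
--         if tree <= forest[row][neighbour]:
--             left = False
--             break
--     for neighbour in neighbours_right:
--         if tree <= forest[row][neighbour]:
--             right = False
--             break
--
--     return [left, right]
-- ===== SOURCE B (Python) =====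
-- forest = []
--
-- def check_horizontal(row, column, forest=forest):
--     line = forest[row]
--     tree = line[column]
--     # one pass: record every position whose tree blocks this height
--     blockers = [i for i, v in enumerate(line) if v >= tree]
--     # column itself is always a blocker, so blockers is non-empty:
--     # visible from the left iff the FIRST blocker is the column itself,
--     # visible from the right iff the LAST blocker is the column itself
--     return [blockers[0] == column, blockers[-1] == column]
-- ===== Notes on version B (the rewrite author's own statement) =====
-- stated objective: alternative
-- what changed: Instead of scanning outward from the column on each side with early break, B builds in one enumerate pass the list of positions whose height blocks the tree and decides both sides by position: visible left/right iff the first/last blocker is the column itself.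
-- outside the precondition, e.g. on check_horizontal(0, -1, [[5, 3]]): A returns [True, False], B returns [False, False]
import Mathlib
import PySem

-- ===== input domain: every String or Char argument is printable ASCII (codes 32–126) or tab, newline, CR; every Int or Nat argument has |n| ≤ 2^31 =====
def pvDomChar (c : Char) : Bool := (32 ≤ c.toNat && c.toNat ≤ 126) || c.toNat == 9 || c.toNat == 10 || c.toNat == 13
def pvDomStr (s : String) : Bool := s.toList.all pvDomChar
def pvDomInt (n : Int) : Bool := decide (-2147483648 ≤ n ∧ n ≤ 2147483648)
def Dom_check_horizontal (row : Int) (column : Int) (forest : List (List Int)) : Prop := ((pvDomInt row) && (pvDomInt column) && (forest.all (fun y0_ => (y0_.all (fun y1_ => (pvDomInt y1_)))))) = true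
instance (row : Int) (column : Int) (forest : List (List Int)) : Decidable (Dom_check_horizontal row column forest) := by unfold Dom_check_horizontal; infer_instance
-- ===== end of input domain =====

-- B replaces A's two outward break-scans by a single enumerate pass collecting blocking
-- positions and comparing the first/last blocker with the column (objective: alternative).

-- ===== PORT A =====
-- one 'for neighbour in idxs: if tree <= forest[row][neighbour]: flag = False; break' loop
-- (pyGetD is exact here: under Pre_ every scanned index is in range)
def chScanA (forest : List (List Int)) (row : Int) (tree : Int) : List Int → Bool
  | [] => true
  | i :: rest =>
    if tree ≤ PySem.List.pyGetD (PySem.List.pyGetD forest row []) i 0 then false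
    else chScanA forest row tree rest

def check_horizontal (row : Int) (column : Int) (forest : List (List Int)) : List Bool :=
  let tree := PySem.List.pyGetD (PySem.List.pyGetD forest row []) column 0
  let neighbours_left := (PySem.List.pyRange 0 column 1).reverse
  let neighbours_right := PySem.List.pyRange (column + 1) ((PySem.List.pyGetD forest row []).length : Int) 1
  let left := chScanA forest row tree neighbours_left
  let right := chScanA forest row tree neighbours_right
  [left, right]

-- ===== PORT B =====
-- the comprehension is a filterMap over enumerate; blockers[0]/blockers[-1] are pyGetD at 0/-1
-- (the defaults are never used under Pre_: the column itself is always a blocker)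
def check_horizontal_alt (row : Int) (column : Int) (forest : List (List Int)) : List Bool :=
  let line_ := PySem.List.pyGetD forest row []
  let tree := PySem.List.pyGetD line_ column 0
  let blockers := (PySem.List.enumerate line_ 0).filterMap
    (fun p => if tree ≤ p.2 then some p.1 else none)
  [PySem.List.pyGetD blockers 0 0 == column, PySem.List.pyGetD blockers (-1) 0 == column]

-- ===== PRECONDITION & SPEC =====
-- Pre_ excludes out-of-range indices (IndexError in both programs) and negative wraparound COLUMNS:
-- a corner outside the puzzle's grid-coordinate domain where A's scan bounds are still computed from
-- the raw negative column, so e.g. the right scan includes the tree itself. Negative rows stay inside Pre_.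
def Pre_check_horizontal (row : Int) (column : Int) (forest : List (List Int)) : Prop :=
  PySem.Raise.InRange forest.length row ∧ 0 ≤ column ∧ column < ((PySem.List.pyGetD forest row []).length : Int)
instance (row : Int) (column : Int) (forest : List (List Int)) : Decidable (Pre_check_horizontal row column forest) := by unfold Pre_check_horizontal; infer_instance

def pvWitness_check_horizontal : Int × Int × List (List Int) := (0, 1, [[3, 5, 4]])

def Spec_check_horizontal (row : Int) (column : Int) (forest : List (List Int)) (out : List Bool) : Prop := out = check_horizontal_alt row column forest
instance (row : Int) (column : Int) (forest : List (List Int)) (out : List Bool) : Decidable (Spec_check_horizontal row column forest out) := by unfold Spec_check_horizontal; infer_instance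

-- ===== CLAIM (what is proved, stated in full; the proofs are below) =====
def Claim_equal_check_horizontal : Prop := ∀ (row : Int) (column : Int) (forest : List (List Int)), Dom_check_horizontal row column forest → Pre_check_horizontal row column forest → Spec_check_horizontal row column forest (check_horizontal row column forest)

-- ===== LEMMAS AND PROOFS =====

-- the break loop is an 'all' over the scanned indices
theorem chScanA_eq_all (forest : List (List Int)) (row : Int) (tree : Int) (idxs : List Int) :
    chScanA forest row tree idxs
      = idxs.all (fun i => !decide (tree ≤ PySem.List.pyGetD (PySem.List.pyGetD forest row []) i 0)) := by
  induction idxs with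
  | nil => rfl
  | cons i rest ih =>
    simp only [chScanA, List.all_cons, ih]
    split_ifs with h <;> simp [h]

-- scanning indices a..len-1 is scanning the values of drop a
theorem all_pyRange_drop (l : List Int) (a : Nat) (p : Int → Bool) :
    (PySem.List.pyRange (a : Int) (l.length : Int) 1).all (fun i => p (PySem.List.pyGetD l i 0))
      = (l.drop a).all p := by
  have h := PySem.List.map_pyGetD_pyRange (xs := l) (d := 0) (a := (a : Int)) (by positivity)
  rw [PySem.List.len_eq] at h
  calc (PySem.List.pyRange (a : Int) (l.length : Int) 1).all (fun i => p (PySem.List.pyGetD l i 0))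
      = ((PySem.List.pyRange (a : Int) (l.length : Int) 1).map (fun i => PySem.List.pyGetD l i 0)).all p := by
        rw [List.all_map]; rfl
    _ = (l.drop a).all p := by rw [h]; simp

-- scanning indices 0..c-1 is scanning the values of take c
theorem all_pyRange_take (l : List Int) (c : Nat) (hc : c ≤ l.length) (p : Int → Bool) :
    (PySem.List.pyRange 0 (c : Int) 1).all (fun i => p (PySem.List.pyGetD l i 0))
      = (l.take c).all p := by
  have hlen : (l.take c).length = c := by simp [hc]
  have h0 : ∀ i ∈ PySem.List.pyRange 0 (c : Int) 1,
      p (PySem.List.pyGetD l i 0) = p (PySem.List.pyGetD (l.take c) i 0) := by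
    intro i hi
    rw [PySem.List.mem_pyRange_one] at hi
    obtain ⟨h1, h2⟩ := hi
    rw [PySem.List.pyGetD_eq_getElem l 0 h1 (by omega),
        PySem.List.pyGetD_eq_getElem (l.take c) 0 h1 (by rw [hlen]; omega)]
    congr 1
    rw [List.getElem_take]
  calc (PySem.List.pyRange 0 (c : Int) 1).all (fun i => p (PySem.List.pyGetD l i 0))
      = (PySem.List.pyRange 0 (c : Int) 1).all (fun i => p (PySem.List.pyGetD (l.take c) i 0)) := by
        rw [Bool.eq_iff_iff, List.all_eq_true, List.all_eq_true]
        constructor <;> intro h i hi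
        · rw [← h0 i hi]; exact h i hi
        · rw [h0 i hi]; exact h i hi
    _ = (l.take c).all p := by
        have := all_pyRange_drop (l.take c) 0 p
        simpa [hlen] using this

-- shorthand for B's blocker comprehension over a sublist enumerated from offset s
def blk (tree : Int) (xs : List Int) (s : Int) : List Int :=
  (PySem.List.enumerate xs s).filterMap (fun p => if tree ≤ p.2 then some p.1 else none)

-- blockers of a prefix/suffix are empty iff every value there is strictly below the tree
theorem blk_eq_nil_iff (tree : Int) (xs : List Int) (s : Int) :
    blk tree xs s = [] ↔ xs.all (fun v => !decide (tree ≤ v)) := by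
  unfold blk
  rw [List.filterMap_eq_nil_iff, List.all_eq_true]
  constructor
  · intro h v hv
    obtain ⟨k, hk, rfl⟩ := List.getElem_of_mem hv
    have hp : ((s + k : Int), xs[k]) ∈ PySem.List.enumerate xs s := by
      rw [PySem.List.mem_enumerate_iff]; exact ⟨k, hk, rfl⟩
    have h2 := h _ hp
    by_cases hle : tree ≤ xs[k]
    · simp [hle] at h2
    · simp [hle]
  · intro h p hp
    rw [PySem.List.mem_enumerate_iff] at hp
    obtain ⟨k, hk, rfl⟩ := hp
    have := h xs[k] (List.getElem_mem hk)
    simp only [Bool.not_eq_eq_eq_not, Bool.not_true, decide_eq_false_iff_not] at this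
    simp [this]

-- every blocker index of (enumerate xs s) lies in [s, s + len xs)
theorem blk_mem_bounds (tree : Int) (xs : List Int) (s : Int) :
    ∀ j ∈ blk tree xs s, s ≤ j ∧ j < s + xs.length := by
  intro j hj
  unfold blk at hj
  rw [List.mem_filterMap] at hj
  obtain ⟨p, hp, hpj⟩ := hj
  have hj' : p.1 = j := by
    by_cases h : tree ≤ p.2
    · simpa [h] using hpj
    · simp [h] at hpj
  subst hj'
  rw [PySem.List.mem_enumerate_iff] at hp
  obtain ⟨k, hk, rfl⟩ := hp
  refine ⟨?_, ?_⟩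
  · show s ≤ s + (k : Int)
    omega
  · show s + (k : Int) < s + (xs.length : Int)
    omega

theorem check_horizontal_main (row : Int) (column : Int) (forest : List (List Int))
    (hpre : Pre_check_horizontal row column forest) :
    check_horizontal row column forest = check_horizontal_alt row column forest := by
  obtain ⟨-, hc0, hclen⟩ := hpre
  set ln := PySem.List.pyGetD forest row [] with hlndef
  set c := column.toNat with hc
  have hcl : c < ln.length := by omega
  have hcol : column = ((c : Nat) : Int) := by omega
  have htree : PySem.List.pyGetD ln column 0 = ln[c]'hcl :=
    PySem.List.pyGetD_eq_getElem ln 0 hc0 (by omega)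
  set tree := ln[c]'hcl with htreedef
  -- split the line around the column
  have hsplit : ln = ln.take c ++ tree :: ln.drop (c + 1) := by
    conv_lhs => rw [← List.take_append_drop c ln]
    rw [List.drop_eq_getElem_cons hcl]
  have htakelen : (ln.take c).length = c := by simp [le_of_lt hcl]
  -- B's blocker list splits around the column's own entry
  have hblk : blk tree ln 0
      = blk tree (ln.take c) 0 ++ (c : Int) :: blk tree (ln.drop (c + 1)) ((c + 1 : Nat) : Int) := by
    conv_lhs => rw [hsplit]
    unfold blk
    rw [PySem.List.enumerate_append, List.filterMap_append, PySem.List.enumerate_cons]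
    simp only [List.filterMap_cons, htakelen, le_refl, if_pos]
    simp only [zero_add, Nat.cast_add, Nat.cast_one]
  simp only [check_horizontal, check_horizontal_alt, ← hlndef, htree]
  have hBalt : ((PySem.List.enumerate ln 0).filterMap
      (fun p => if tree ≤ p.2 then some p.1 else none)) = blk tree ln 0 := rfl
  rw [hBalt, hblk]
  -- A's two scans as 'all' over take/drop
  rw [chScanA_eq_all, chScanA_eq_all]
  simp only [← hlndef, List.all_reverse]
  rw [hcol]
  have h1 := all_pyRange_take ln c (le_of_lt hcl) (fun v => !decide (tree ≤ v))
  have h2 : ((c : Nat) : Int) + 1 = ((c + 1 : Nat) : Int) := by omega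
  rw [h1, h2, all_pyRange_drop ln (c + 1) (fun v => !decide (tree ≤ v))]
  -- both components
  simp only [List.cons.injEq, and_true]
  refine ⟨?_, ?_⟩
  -- left: first blocker is the column iff the prefix has no blocker
  · cases hBL : blk tree (ln.take c) 0 with
    | nil =>
      have hallt := (blk_eq_nil_iff tree (ln.take c) 0).mp hBL
      rw [hallt]
      simp [PySem.List.pyGetD_zero_cons]
    | cons b bs =>
      have hb : b < (c : Int) := by
        have := blk_mem_bounds tree (ln.take c) 0 b (by rw [hBL]; exact List.mem_cons_self)
        rw [htakelen] at this; omega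
      have hall : (ln.take c).all (fun v => !decide (tree ≤ v)) = false := by
        rw [← Bool.not_eq_true, ← blk_eq_nil_iff tree (ln.take c) 0, hBL]; simp
      rw [hall]
      simp only [List.cons_append, PySem.List.pyGetD_zero_cons]
      symm
      rw [beq_eq_false_iff_ne]
      omega
  -- right: last blocker is the column iff the suffix has no blocker
  · cases hBR : blk tree (ln.drop (c + 1)) ((c + 1 : Nat) : Int) with
    | nil =>
      have hallt := (blk_eq_nil_iff tree (ln.drop (c + 1)) ((c + 1 : Nat) : Int)).mp hBR
      rw [hallt]
      have hsing : blk tree (ln.take c) 0 ++ (c : Int) :: ([] : List Int)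
          = blk tree (ln.take c) 0 ++ [(c : Int)] := rfl
      rw [hsing, PySem.List.pyGetD_neg_one_append_singleton]
      simp
    | cons b bs =>
      have hne : blk tree (ln.take c) 0 ++ (c : Int) :: b :: bs ≠ [] := by simp
      have hlast : (blk tree (ln.take c) 0 ++ (c : Int) :: b :: bs).getLast hne
          = (b :: bs).getLast (by simp) := by
        rw [List.getLast_append_of_ne_nil (by simp)]
        exact List.getLast_cons (by simp)
      have hmem : (b :: bs).getLast (by simp) ∈ blk tree (ln.drop (c + 1)) ((c + 1 : Nat) : Int) := by
        rw [hBR]; exact List.getLast_mem _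
      have hgt : (c : Int) < (b :: bs).getLast (by simp) := by
        have := blk_mem_bounds tree (ln.drop (c + 1)) ((c + 1 : Nat) : Int) _ hmem
        omega
      have hall : (ln.drop (c + 1)).all (fun v => !decide (tree ≤ v)) = false := by
        rw [← Bool.not_eq_true, ← blk_eq_nil_iff tree (ln.drop (c + 1)) ((c + 1 : Nat) : Int), hBR]
        simp
      rw [hall, PySem.List.pyGetD_neg_one _ 0 hne, hlast]
      symm
      rw [beq_eq_false_iff_ne]
      omega

-- ===== VERDICT (by name: the statement is the Claim_ definition above) =====
theorem check_horizontal_spec : Claim_equal_check_horizontal := by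
  intro row column forest _ hpre
  exact check_horizontal_main row column forest hpre
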